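-- pv_equiv track=rewrite | github.com/as3richa/alpha3 | alpha3/games/connectk.py | _k_connected
-- ===== SOURCE A (Python) =====
-- def _k_connected(vector, k):
--     run = 0
--
--     for i in range(len(vector)):
--         if vector[i]:
--             run += 1
--             if run >= k:
--                 return True
--         else:
--             run = 0
--
--     return False
-- ===== SOURCE B (Python) =====
-- def _k_connected(vector, k):
--     # Scan maximal runs of truthy elements; compare each full run length to k once.
--     i = 0
--     n = len(vector)
--     while i < n:
--         if vector[i]:
--             j = i
--             while j < n and vector[j]:
--                 j += 1
--             if j - i >= k:
--                 return True
--             i = j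
--         else:
--             i += 1
--     return False
-- ===== Notes on version B (the rewrite author's own statement) =====
-- stated objective: alternative
-- what changed: Replaced the running counter that resets on falsy elements by a run-decomposition scan: skip falsy elements, measure each maximal truthy run in one inner scan, and compare its full length to k once.
import Mathlib
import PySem

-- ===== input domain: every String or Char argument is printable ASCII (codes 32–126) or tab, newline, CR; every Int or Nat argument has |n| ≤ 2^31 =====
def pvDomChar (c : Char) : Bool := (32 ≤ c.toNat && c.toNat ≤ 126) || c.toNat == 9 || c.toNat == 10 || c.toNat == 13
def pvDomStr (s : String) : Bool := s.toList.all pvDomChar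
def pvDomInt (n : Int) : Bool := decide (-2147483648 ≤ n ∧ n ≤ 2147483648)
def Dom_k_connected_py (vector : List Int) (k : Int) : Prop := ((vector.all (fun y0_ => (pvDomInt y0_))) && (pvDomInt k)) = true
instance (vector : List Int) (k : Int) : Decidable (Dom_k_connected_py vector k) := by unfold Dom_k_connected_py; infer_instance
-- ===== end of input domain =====

-- B replaces A's reset-counter loop by a maximal-truthy-run scan (alternative decomposition, same return value; not faster).


-- ===== PORT A =====
def kcGoA : List Int → Int → Int → Bool
  | [], _, _ => false
  | x :: xs, run, k =>
    if x ≠ 0 then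
      (if k ≤ run + 1 then true else kcGoA xs (run + 1) k)
    else kcGoA xs 0 k

-- Port of A: running counter `run`, reset on falsy, early True once run >= k.
def k_connected_py (vector : List Int) (k : Int) : Bool := kcGoA vector 0 k


-- ===== PORT B =====
def kcGoB (xs : List Int) (k : Int) : Bool :=
  match xs with
  | [] => false
  | x :: rest =>
    if x ≠ 0 then
      (if k ≤ 1 + ((rest.takeWhile (fun y => y ≠ 0)).length : Int) then true
       else kcGoB (rest.dropWhile (fun y => y ≠ 0)) k)
    else kcGoB rest k
termination_by xs.length
decreasing_by
  · exact Nat.lt_succ_of_le (List.length_dropWhile_le _ _)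
  · simp

-- Port of B: scan maximal truthy runs (inner while = takeWhile/dropWhile), compare each full run length to k once.
def k_connected_py_alt (vector : List Int) (k : Int) : Bool := kcGoB vector k


-- ===== PRECONDITION & SPEC =====
def Spec_k_connected_py (vector : List Int) (k : Int) (out : Bool) : Prop := out = k_connected_py_alt vector k
instance (vector : List Int) (k : Int) (out : Bool) : Decidable (Spec_k_connected_py vector k out) := by unfold Spec_k_connected_py; infer_instance

-- ===== CLAIM (what is proved, stated in full; the proofs are below) =====
def Claim_equal_k_connected_py : Prop := ∀ (vector : List Int) (k : Int), Dom_k_connected_py vector k → Spec_k_connected_py vector k (k_connected_py vector k)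

-- ===== LEMMAS AND PROOFS =====


theorem kcGoA_run (xs : List Int) (run k : Int) :
    kcGoA xs run k =
      ((decide ((1:Int) ≤ ((xs.takeWhile (fun y => y ≠ 0)).length : Int)) &&
        decide (k ≤ run + ((xs.takeWhile (fun y => y ≠ 0)).length : Int))) ||
       kcGoA (xs.dropWhile (fun y => y ≠ 0)) 0 k) := by
  induction xs generalizing run with
  | nil => simp [kcGoA]
  | cons x xs ih =>
    by_cases hx : x = 0
    · have hpx : (fun y : Int => decide (y ≠ 0)) x = false := by simp [hx]
      rw [List.takeWhile_cons_of_neg (by simp [hpx]), List.dropWhile_cons_of_neg (by simp [hpx])]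
      rw [show kcGoA (x :: xs) run k = kcGoA xs 0 k from by rw [kcGoA, if_neg (by simp [hx])]]
      rw [show kcGoA (x :: xs) 0 k = kcGoA xs 0 k from by rw [kcGoA, if_neg (by simp [hx])]]
      simp
    · have hpx : (fun y : Int => decide (y ≠ 0)) x = true := by simp [hx]
      rw [List.takeWhile_cons_of_pos (by simp [hpx]), List.dropWhile_cons_of_pos (by simp [hpx])]
      rw [show kcGoA (x :: xs) run k
            = (if k ≤ run + 1 then true else kcGoA xs (run + 1) k) from by
          rw [kcGoA, if_pos hx]]
      set t : Int := ((xs.takeWhile (fun y => y ≠ 0)).length : Int) with ht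
      have ht0 : 0 ≤ t := Int.natCast_nonneg _
      have hlen : (((x :: xs.takeWhile (fun y => y ≠ 0)).length : Int)) = t + 1 := by
        simp [ht]
      rw [hlen]
      by_cases hk : k ≤ run + 1
      · have e1 : ((1:Int) ≤ t + 1) := by omega
        have e2 : k ≤ run + (t + 1) := by omega
        simp [hk, e1, e2]
      · rw [if_neg hk, ih]
        by_cases h0 : (1:Int) ≤ t
        · have hB : ((1:Int) ≤ t + 1) := by omega
          have hC : run + 1 + t = run + (t + 1) := by ring
          simp only [hC, h0, hB, decide_true, Bool.true_and]
        · have h0' : t = 0 := by omega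
          have hB : ((1:Int) ≤ t + 1) := by omega
          simp [h0']
          intro h
          exact absurd h hk

theorem kc_main (xs : List Int) (k : Int) : kcGoA xs 0 k = kcGoB xs k := by
  match xs with
  | [] => simp [kcGoA, kcGoB]
  | x :: rest =>
    by_cases hx : x = 0
    · rw [show kcGoA (x :: rest) 0 k = kcGoA rest 0 k from by rw [kcGoA, if_neg (by simp [hx])]]
      rw [show kcGoB (x :: rest) k = kcGoB rest k from by rw [kcGoB, if_neg (by simp [hx])]]
      exact kc_main rest k
    · have hpx : (fun y : Int => decide (y ≠ 0)) x = true := by simp [hx]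
      rw [kcGoA_run]
      rw [List.takeWhile_cons_of_pos (by simp [hpx]), List.dropWhile_cons_of_pos (by simp [hpx])]
      rw [show kcGoB (x :: rest) k
            = (if k ≤ 1 + ((rest.takeWhile (fun y => y ≠ 0)).length : Int) then true
               else kcGoB (rest.dropWhile (fun y => y ≠ 0)) k) from by
          rw [kcGoB, if_pos hx]]
      set t : Int := ((rest.takeWhile (fun y => y ≠ 0)).length : Int) with ht
      have ht0 : 0 ≤ t := Int.natCast_nonneg _
      have hlen : (((x :: rest.takeWhile (fun y => y ≠ 0)).length : Int)) = t + 1 := by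
        simp [ht]
      rw [hlen]
      by_cases hk : k ≤ 1 + t
      · have e1 : ((1:Int) ≤ t + 1) := by omega
        simp [hk, e1]
        exact Or.inl (by omega)
      · have e1 : ((1:Int) ≤ t + 1) := by omega
        have e3 : ¬ k ≤ t + 1 := by omega
        simp [hk, e3]
        have h := kc_main (rest.dropWhile (fun y => y ≠ 0)) k
        simpa using h
termination_by xs.length
decreasing_by
  · simp
  · exact Nat.lt_succ_of_le (List.length_dropWhile_le _ _)

-- ===== VERDICT (by name: the statement is the Claim_ definition above) =====
theorem k_connected_py_spec : Claim_equal_k_connected_py := by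
  intro vector k _
  unfold Spec_k_connected_py k_connected_py k_connected_py_alt
  exact kc_main vector k
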